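-- pv_equiv track=rewrite | github.com/pradumanprajapati/Compitative-programming | M N matrix.py | sumOfKxKMatrices
-- ===== SOURCE A (Python) =====
-- def sumOfKxKMatrices(arr:list, k:int):
--     n = len(arr)
--
--     ans = [[0 for i in range(n-k+1)] for j in range(n-k+1)]
--
--     for i in range(n-k+1):
--         for j in range(n-k+1):
--             sm = 1
--             for x in range(k):
--                 for y in range(k):
--                     sm *= arr[x + i][y + j]
--             ans[i][j] = sm
--     return ans
-- ===== SOURCE B (Python) =====
-- def _windowProd(cells, start, k):
--     p = 1
--     for t in range(k):
--         p *= cells[start + t]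
--     return p
--
-- def _colProd(row_win, i, j, k):
--     p = 1
--     for x in range(k):
--         p *= row_win[i + x][j]
--     return p
--
-- def sumOfKxKMatrices(arr: list, k: int):
--     n = len(arr)
--     m = n - k + 1
--     # pass 1: product of every horizontal length-k window of each row
--     row_win = [[_windowProd(row, j, k) for j in range(m)] for row in arr]
--     # pass 2: for each output cell, product of the k vertically stacked window products
--     return [[_colProd(row_win, i, j, k) for j in range(m)] for i in range(m)]
-- ===== Notes on version B (the rewrite author's own statement) =====
-- stated objective: alternative
-- what changed: B replaces the four-level nested loop (recomputing each KxK product element by element, k^2 multiplications per entry) with a two-pass decomposition: first the product of every horizontal length-k window of each row, then for each output cell the product of the k vertically stacked row-window products (2k multiplications per entry).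
import Mathlib
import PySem

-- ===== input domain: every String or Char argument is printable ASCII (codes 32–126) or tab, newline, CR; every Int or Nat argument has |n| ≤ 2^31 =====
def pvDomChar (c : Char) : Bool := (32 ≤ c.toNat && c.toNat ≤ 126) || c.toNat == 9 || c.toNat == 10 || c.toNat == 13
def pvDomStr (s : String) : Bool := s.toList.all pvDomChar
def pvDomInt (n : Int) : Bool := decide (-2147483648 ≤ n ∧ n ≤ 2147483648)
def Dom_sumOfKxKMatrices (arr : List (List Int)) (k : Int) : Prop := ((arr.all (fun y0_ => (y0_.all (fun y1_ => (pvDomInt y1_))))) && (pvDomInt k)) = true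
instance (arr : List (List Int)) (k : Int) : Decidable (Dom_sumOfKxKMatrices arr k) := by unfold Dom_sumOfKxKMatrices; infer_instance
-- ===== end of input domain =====

-- B computes each KxK product in two passes (per-row horizontal window products, then a vertical
-- product of k stacked window products) instead of recomputing it element by element.

-- ===== PORT A =====
-- the innermost two loops of A: sm = 1; for x in range(k): for y in range(k): sm *= arr[x+i][y+j]
-- (under Pre_ every index is in range, so pyGetD's defaults are never used)
def pyProdKK (arr : List (List Int)) (k i j : Int) : Int :=
  (PySem.List.pyRange 0 k 1).foldl (fun sm x =>
    (PySem.List.pyRange 0 k 1).foldl (fun sm y =>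
      sm * PySem.List.pyGetD (PySem.List.pyGetD arr (x + i) []) (y + j) 0) sm) 1

def sumOfKxKMatrices (arr : List (List Int)) (k : Int) : List (List Int) :=
  let n : Int := arr.length
  let ans0 : List (List Int) :=
    (PySem.List.pyRange 0 (n - k + 1) 1).map (fun _ =>
      (PySem.List.pyRange 0 (n - k + 1) 1).map (fun _ => (0 : Int)))
  -- for i …: for j …: ans[i][j] = sm   ('ans[i][j] = v' becomes 'ans.set i (ans[i].set j v)'; i, j ≥ 0 here)
  (PySem.List.pyRange 0 (n - k + 1) 1).foldl (fun ans i =>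
    (PySem.List.pyRange 0 (n - k + 1) 1).foldl (fun ans j =>
      ans.set i.toNat ((ans.getD i.toNat []).set j.toNat (pyProdKK arr k i j))) ans) ans0

-- ===== PORT B =====
-- _windowProd of Source B
def windowProd (cells : List Int) (start k : Int) : Int :=
  (PySem.List.pyRange 0 k 1).foldl (fun p t => p * PySem.List.pyGetD cells (start + t) 0) 1

-- _colProd of Source B
def colProd (rowWin : List (List Int)) (i j k : Int) : Int :=
  (PySem.List.pyRange 0 k 1).foldl (fun p x =>
    p * PySem.List.pyGetD (PySem.List.pyGetD rowWin (i + x) []) j 0) 1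

def sumOfKxKMatrices_alt (arr : List (List Int)) (k : Int) : List (List Int) :=
  let n : Int := arr.length
  let m : Int := n - k + 1
  let rowWin : List (List Int) :=
    arr.map (fun row => (PySem.List.pyRange 0 m 1).map (fun j => windowProd row j k))
  (PySem.List.pyRange 0 m 1).map (fun i =>
    (PySem.List.pyRange 0 m 1).map (fun j => colProd rowWin i j k))

-- ===== PRECONDITION & SPEC =====
-- Pre_ is exactly where the Python A returns: A raises IndexError iff 1 ≤ k ≤ len(arr) and some
-- row is shorter than len(arr) (every row 0..n-1 is then read up to column n-1); B raises there too.
def Pre_sumOfKxKMatrices (arr : List (List Int)) (k : Int) : Prop :=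
  k < 1 ∨ (arr.length : Int) < k ∨ ∀ row ∈ arr, arr.length ≤ row.length
instance (arr : List (List Int)) (k : Int) : Decidable (Pre_sumOfKxKMatrices arr k) := by
  unfold Pre_sumOfKxKMatrices; infer_instance
def pvWitness_sumOfKxKMatrices : List (List Int) × Int := ([[1, 2], [3, 4]], 2)

def Spec_sumOfKxKMatrices (arr : List (List Int)) (k : Int) (out : List (List Int)) : Prop :=
  out = sumOfKxKMatrices_alt arr k
instance (arr : List (List Int)) (k : Int) (out : List (List Int)) : Decidable (Spec_sumOfKxKMatrices arr k out) := by
  unfold Spec_sumOfKxKMatrices; infer_instance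

-- ===== CLAIM =====
def Claim_equal_sumOfKxKMatrices : Prop := ∀ (arr : List (List Int)) (k : Int), Dom_sumOfKxKMatrices arr k → Pre_sumOfKxKMatrices arr k → Spec_sumOfKxKMatrices arr k (sumOfKxKMatrices arr k)

-- ===== LEMMAS AND PROOFS =====

lemma set_getD_self {α : Type} (l : List α) (i : Nat) (d : α) : l.set i (l.getD i d) = l := by
  by_cases h : i < l.length
  · rw [List.getD_eq_getElem l d h]; exact List.set_getElem_self h
  · exact List.set_eq_of_length_le (by omega)

-- a fold that repeatedly rewrites slot i of a list of lists acts only on that slot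
lemma foldl_set_slot {β : Type} (i : Nat) (g : β → List Int → List Int) :
    ∀ (js : List β) (ans : List (List Int)),
      js.foldl (fun a j => a.set i (g j (a.getD i []))) ans
        = ans.set i (js.foldl (fun r j => g j r) (ans.getD i [])) := by
  intro js
  induction js with
  | nil =>
    intro ans
    simp only [List.foldl_nil]
    exact (set_getD_self ans i []).symm
  | cons j js ih =>
    intro ans
    simp only [List.foldl_cons]
    by_cases hi : i < ans.length
    · rw [ih]
      have h1 : (ans.set i (g j (ans.getD i []))).getD i [] = g j (ans.getD i []) := by
        rw [List.getD_eq_getElem?_getD, List.getElem?_set_self (by simpa using hi)]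
        rfl
      rw [h1, List.set_set]
    · have h1 : ans.set i (g j (ans.getD i [])) = ans := List.set_eq_of_length_le (by omega)
      rw [h1, ih, List.set_eq_of_length_le (by omega), List.set_eq_of_length_le (by omega)]

-- fold over range L setting slot i to a function of the previous content of slot i
lemma foldl_range_set {α : Type} (d : α) (f : Nat → α → α) :
    ∀ (L : Nat) (init : List α), L ≤ init.length →
      (List.range L).foldl (fun a i => a.set i (f i (a.getD i d))) init
        = (List.range L).map (fun i => f i (init.getD i d)) ++ init.drop L := by
  intro L
  induction L with
  | zero => intro init h; simp
  | succ L ih =>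
    intro init h
    rw [List.range_succ, List.foldl_append, List.map_append, ih init (by omega)]
    simp only [List.foldl_cons, List.foldl_nil, List.map_cons, List.map_nil]
    have hlen : ((List.range L).map (fun i => f i (init.getD i d))).length = L := by simp
    have hdrop : init.drop L = init[L] :: init.drop (L + 1) := List.drop_eq_getElem_cons (by omega)
    have hgd : init.getD L d = init[L] := List.getD_eq_getElem init d (by omega)
    have hget : ((List.range L).map (fun i => f i (init.getD i d)) ++ init.drop L).getD L d
        = init[L] := by
      rw [List.getD_eq_getElem?_getD, List.getElem?_append_right (by omega), hlen, hdrop, Nat.sub_self,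
        List.getElem?_cons_zero]
      rfl
    rw [hget, List.set_append_right _ _ (by omega), hlen, hdrop, Nat.sub_self, List.set_cons_zero,
      hgd, List.append_assoc]
    rfl

-- the inner row fold of A: setting every slot of a length-(m.toNat) row turns it into the map
lemma row_fold_eq_map (m : Int) (g1 : Int → Int) (row : List Int) (hrow : row.length = m.toNat) :
    (PySem.List.pyRange 0 m 1).foldl (fun r j => r.set j.toNat (g1 j)) row
      = (PySem.List.pyRange 0 m 1).map g1 := by
  rw [PySem.List.pyRange_one, List.foldl_map, List.map_map]
  have h0 : (m - 0).toNat = m.toNat := by omega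
  rw [h0]
  have hf : (fun (r : List Int) (t : Nat) => r.set ((0:Int) + (t : Int)).toNat (g1 (0 + (t : Int))))
      = fun (r : List Int) (t : Nat) => r.set t ((fun (s : Nat) (_ : Int) => g1 (0 + (s : Int))) t (r.getD t 0)) := by
    funext r t; simp
  rw [hf, foldl_range_set (0 : Int) (fun s _ => g1 (0 + (s : Int))) m.toNat row (by omega),
    List.drop_of_length_le (by omega), List.append_nil]
  simp [Function.comp]

-- the outer fold of A: each slot is rewritten once, from its previous content
lemma outer_fold_eq_map (m : Int) (g : Int → List Int → List Int) (init : List (List Int))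
    (hlen : init.length = m.toNat) :
    (PySem.List.pyRange 0 m 1).foldl (fun ans i => ans.set i.toNat (g i (ans.getD i.toNat []))) init
      = (PySem.List.pyRange 0 m 1).map (fun i => g i (init.getD i.toNat [])) := by
  rw [PySem.List.pyRange_one, List.foldl_map, List.map_map]
  have h0 : (m - 0).toNat = m.toNat := by omega
  rw [h0]
  have hf : (fun (ans : List (List Int)) (t : Nat) =>
        ans.set ((0:Int) + (t : Int)).toNat (g (0 + (t : Int)) (ans.getD ((0:Int) + (t : Int)).toNat [])))
      = fun (ans : List (List Int)) (t : Nat) =>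
        ans.set t ((fun (s : Nat) (r : List Int) => g (0 + (s : Int)) r) t (ans.getD t [])) := by
    funext ans t; simp
  rw [hf, foldl_range_set ([] : List Int) (fun s r => g (0 + (s : Int)) r) m.toNat init (by omega),
    List.drop_of_length_le (by omega), List.append_nil]
  apply List.map_congr_left
  intro t _
  simp

-- A in closed map form
lemma A_eq_map (arr : List (List Int)) (k : Int) :
    sumOfKxKMatrices arr k
      = (PySem.List.pyRange 0 ((arr.length : Int) - k + 1) 1).map (fun i =>
          (PySem.List.pyRange 0 ((arr.length : Int) - k + 1) 1).map (fun j => pyProdKK arr k i j)) := by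
  simp only [sumOfKxKMatrices]
  have hstep : (fun (ans : List (List Int)) (i : Int) =>
        (PySem.List.pyRange 0 ((arr.length : Int) - k + 1) 1).foldl
          (fun ans j => ans.set i.toNat ((ans.getD i.toNat []).set j.toNat (pyProdKK arr k i j))) ans)
      = fun (ans : List (List Int)) (i : Int) =>
        ans.set i.toNat ((PySem.List.pyRange 0 ((arr.length : Int) - k + 1) 1).foldl
          (fun r j => r.set j.toNat (pyProdKK arr k i j)) (ans.getD i.toNat [])) := by
    funext ans i
    exact foldl_set_slot i.toNat (fun j r => r.set j.toNat (pyProdKK arr k i j)) _ ans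
  rw [hstep, outer_fold_eq_map ((arr.length : Int) - k + 1)
    (fun i r => (PySem.List.pyRange 0 ((arr.length : Int) - k + 1) 1).foldl
      (fun r j => r.set j.toNat (pyProdKK arr k i j)) r)
    _ (by simp [PySem.List.length_pyRange_one])]
  apply List.map_congr_left
  intro i hi
  have hget : ((PySem.List.pyRange 0 ((arr.length : Int) - k + 1) 1).map (fun _ =>
      (PySem.List.pyRange 0 ((arr.length : Int) - k + 1) 1).map (fun _ => (0:Int)))).getD i.toNat []
      = (PySem.List.pyRange 0 ((arr.length : Int) - k + 1) 1).map (fun _ => (0:Int)) := by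
    have hi' := (PySem.List.mem_pyRange_one.mp hi)
    rw [List.getD_eq_getElem _ _ (by simp [PySem.List.length_pyRange_one]; omega), List.getElem_map]
  rw [hget, row_fold_eq_map _ _ _ (by simp [PySem.List.length_pyRange_one])]

lemma foldl_mul_eq {α : Type} (f : α → Int) : ∀ (l : List α) (a : Int),
    l.foldl (fun s x => s * f x) a = a * (l.map f).prod := by
  intro l
  induction l with
  | nil => intro a; simp
  | cons x l ih => intro a; simp [ih, mul_assoc]

-- one answer entry: A's KxK product equals B's product over the i-th column of row-window products
lemma entry_eq (arr : List (List Int)) (k i j : Int)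
    (hi : 0 ≤ i) (him : i < (arr.length : Int) - k + 1)
    (hj : 0 ≤ j) (hjm : j < (arr.length : Int) - k + 1) :
    pyProdKK arr k i j
      = colProd (arr.map (fun row => (PySem.List.pyRange 0 ((arr.length : Int) - k + 1) 1).map
          (fun j' => windowProd row j' k))) i j k := by
  unfold pyProdKK colProd
  have hinner : (fun (sm x : Int) =>
        (PySem.List.pyRange 0 k 1).foldl (fun sm y =>
          sm * PySem.List.pyGetD (PySem.List.pyGetD arr (x + i) []) (y + j) 0) sm)
      = fun (sm x : Int) => sm *
        ((PySem.List.pyRange 0 k 1).map (fun y =>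
          PySem.List.pyGetD (PySem.List.pyGetD arr (x + i) []) (y + j) 0)).prod := by
    funext sm x
    exact foldl_mul_eq _ _ sm
  rw [hinner, foldl_mul_eq (fun x =>
    ((PySem.List.pyRange 0 k 1).map (fun y =>
      PySem.List.pyGetD (PySem.List.pyGetD arr (x + i) []) (y + j) 0)).prod),
    foldl_mul_eq (fun x => PySem.List.pyGetD (PySem.List.pyGetD
      (arr.map (fun row => (PySem.List.pyRange 0 ((arr.length : Int) - k + 1) 1).map
        (fun j' => windowProd row j' k))) (i + x) []) j 0)]
  congr 1
  apply congrArg List.prod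
  apply List.map_congr_left
  intro x hx
  have hx' := PySem.List.mem_pyRange_one.mp hx
  have hr1 : (0:Int) ≤ i + x := by omega
  have hr2 : i + x < (arr.length : Int) := by omega
  have hRHS : PySem.List.pyGetD (PySem.List.pyGetD
        (arr.map (fun row => (PySem.List.pyRange 0 ((arr.length : Int) - k + 1) 1).map
          (fun j' => windowProd row j' k))) (i + x) []) j 0
      = windowProd arr[(i + x).toNat] j k := by
    rw [PySem.List.pyGetD_eq_getElem _ [] hr1 (by simpa using hr2), List.getElem_map,
      PySem.List.pyGetD_map_pyRange_of_nonneg _ _ _ _ hj hjm]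
  rw [hRHS]
  unfold windowProd
  rw [foldl_mul_eq (fun t => PySem.List.pyGetD arr[(i + x).toNat] (j + t) 0), one_mul]
  congr 1
  apply List.map_congr_left
  intro y _
  rw [show x + i = i + x by ring,
    PySem.List.pyGetD_eq_getElem arr [] hr1 (by simpa using hr2),
    show y + j = j + y by ring]

-- ===== VERDICT =====
theorem sumOfKxKMatrices_spec : Claim_equal_sumOfKxKMatrices := by
  intro arr k _ _
  unfold Spec_sumOfKxKMatrices
  rw [A_eq_map]
  simp only [sumOfKxKMatrices_alt]
  apply List.map_congr_left
  intro i hi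
  apply List.map_congr_left
  intro j hj
  have hi' := PySem.List.mem_pyRange_one.mp hi
  have hj' := PySem.List.mem_pyRange_one.mp hj
  exact entry_eq arr k i j hi'.1 hi'.2 hj'.1 hj'.2
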